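-- pv_equiv track=rewrite | github.com/JehanRock/GIGABOT | nanobot/swarm/deliberation.py | _select_participants
-- ===== SOURCE A (Python) =====
-- def _select_participants(question: str) -> list[str]:
--     """Auto-select participants based on question."""
--     question_lower = question.lower()
--     participants = []
--
--     # Technical/architecture questions
--     if any(kw in question_lower for kw in ["architect", "design", "system", "scale"]):
--         participants.append("architect")
--
--     # Implementation questions
--     if any(kw in question_lower for kw in ["implement", "build", "develop", "code"]):
--         participants.extend(["lead_dev", "senior_dev"])
--
--     # Security questions
--     if any(kw in question_lower for kw in ["security", "safe", "risk", "protect"]):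
--         participants.append("auditor")
--
--     # Quality questions
--     if any(kw in question_lower for kw in ["quality", "test", "reliable", "bug"]):
--         participants.append("qa_engineer")
--
--     # Research questions
--     if any(kw in question_lower for kw in ["research", "compare", "evaluate", "option"]):
--         participants.append("researcher")
--
--     # Default: key stakeholders
--     if not participants:
--         participants = ["architect", "lead_dev", "qa_engineer"]
--
--     return list(set(participants))
-- ===== SOURCE B (Python) =====
-- _RULES = [
--     ("architect", "architect"), ("design", "architect"),
--     ("system", "architect"), ("scale", "architect"),
--     ("implement", "lead_dev"), ("build", "lead_dev"),
--     ("develop", "lead_dev"), ("code", "lead_dev"),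
--     ("implement", "senior_dev"), ("build", "senior_dev"),
--     ("develop", "senior_dev"), ("code", "senior_dev"),
--     ("security", "auditor"), ("safe", "auditor"),
--     ("risk", "auditor"), ("protect", "auditor"),
--     ("quality", "qa_engineer"), ("test", "qa_engineer"),
--     ("reliable", "qa_engineer"), ("bug", "qa_engineer"),
--     ("research", "researcher"), ("compare", "researcher"),
--     ("evaluate", "researcher"), ("option", "researcher"),
-- ]
--
-- _DEFAULT = ["architect", "lead_dev", "qa_engineer"]
--
--
-- def _select_participants(question: str) -> list[str]:
--     """Auto-select participants based on question."""
--     question_lower = question.lower()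
--     hits = [role for kw, role in _RULES if kw in question_lower]
--     return list(set(hits or _DEFAULT))
-- ===== Notes on version B (the rewrite author's own statement) =====
-- stated objective: simpler
-- what changed: Replaces the five hardcoded any()-if-blocks by one flat (keyword, role) rule table scanned with a single comprehension; the final list(set(...)) makes the flattened per-keyword appends return the same value.
import Mathlib
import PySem

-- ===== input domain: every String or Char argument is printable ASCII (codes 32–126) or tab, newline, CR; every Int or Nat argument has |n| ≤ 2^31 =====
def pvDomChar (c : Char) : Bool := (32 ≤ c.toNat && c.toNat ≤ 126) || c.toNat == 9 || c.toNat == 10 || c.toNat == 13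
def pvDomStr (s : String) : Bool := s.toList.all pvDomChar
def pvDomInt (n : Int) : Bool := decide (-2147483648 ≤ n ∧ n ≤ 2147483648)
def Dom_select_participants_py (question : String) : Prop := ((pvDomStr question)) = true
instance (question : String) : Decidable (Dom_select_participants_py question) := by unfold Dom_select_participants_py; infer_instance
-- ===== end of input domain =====

-- B replaces A's five hardcoded if-blocks by one flat (keyword, role) rule table scanned in a single comprehension (objective: simpler/data-driven; same cost).

-- ===== PORT A =====
def select_participants_py (question : String) : List String :=
  let ql := PySem.Str.lower question
  let participants : List String := []
  let participants := if (["architect", "design", "system", "scale"].any fun kw => PySem.Str.isIn kw ql) then participants ++ ["architect"] else participants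
  let participants := if (["implement", "build", "develop", "code"].any fun kw => PySem.Str.isIn kw ql) then participants ++ ["lead_dev", "senior_dev"] else participants
  let participants := if (["security", "safe", "risk", "protect"].any fun kw => PySem.Str.isIn kw ql) then participants ++ ["auditor"] else participants
  let participants := if (["quality", "test", "reliable", "bug"].any fun kw => PySem.Str.isIn kw ql) then participants ++ ["qa_engineer"] else participants
  let participants := if (["research", "compare", "evaluate", "option"].any fun kw => PySem.Str.isIn kw ql) then participants ++ ["researcher"] else participants
  let participants := if participants = [] then ["architect", "lead_dev", "qa_engineer"] else participants
  PySem.Set.ofList participants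

-- ===== PORT B =====
def pvRules : List (String × String) :=
  [("architect", "architect"), ("design", "architect"),
   ("system", "architect"), ("scale", "architect"),
   ("implement", "lead_dev"), ("build", "lead_dev"),
   ("develop", "lead_dev"), ("code", "lead_dev"),
   ("implement", "senior_dev"), ("build", "senior_dev"),
   ("develop", "senior_dev"), ("code", "senior_dev"),
   ("security", "auditor"), ("safe", "auditor"),
   ("risk", "auditor"), ("protect", "auditor"),
   ("quality", "qa_engineer"), ("test", "qa_engineer"),
   ("reliable", "qa_engineer"), ("bug", "qa_engineer"),
   ("research", "researcher"), ("compare", "researcher"),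
   ("evaluate", "researcher"), ("option", "researcher")]

def select_participants_py_alt (question : String) : List String :=
  let ql := PySem.Str.lower question
  let hits := pvRules.foldl (fun acc r => if PySem.Str.isIn r.1 ql then acc ++ [r.2] else acc) ([] : List String)
  PySem.Set.ofList (if hits = [] then ["architect", "lead_dev", "qa_engineer"] else hits)

-- ===== PRECONDITION & SPEC =====
def Spec_select_participants_py (question : String) (out : List String) : Prop := out = select_participants_py_alt question
instance (question : String) (out : List String) : Decidable (Spec_select_participants_py question out) := by unfold Spec_select_participants_py; infer_instance

-- ===== CLAIM (what is proved, stated in full; the proofs are below) =====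
def Claim_equal_select_participants_py : Prop := ∀ (question : String), Dom_select_participants_py question → Spec_select_participants_py question (select_participants_py question)

-- ===== LEMMAS AND PROOFS =====

-- one rule block of the flat table: each keyword of `kws` paired with the same `role`
def pvBlock (kws : List String) (role : String) : List (String × String) :=
  kws.map (fun kw => (kw, role))

-- the flat table is the concatenation of its six constant-role blocks
theorem pvRules_eq : pvRules =
    pvBlock ["architect", "design", "system", "scale"] "architect" ++
    (pvBlock ["implement", "build", "develop", "code"] "lead_dev" ++
    (pvBlock ["implement", "build", "develop", "code"] "senior_dev" ++
    (pvBlock ["security", "safe", "risk", "protect"] "auditor" ++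
    (pvBlock ["quality", "test", "reliable", "bug"] "qa_engineer" ++
    pvBlock ["research", "compare", "evaluate", "option"] "researcher")))) := rfl

-- every role selected from a block is that block's role
theorem pvConst (kws : List String) (role ql : String) :
    ∀ x ∈ (List.filter (fun r => PySem.Str.isIn r.1 ql) (pvBlock kws role)).map (fun r => r.2),
      x = role := by
  intro x hx
  simp only [pvBlock, List.mem_map, List.mem_filter] at hx
  obtain ⟨r, ⟨hr, _⟩, rfl⟩ := hx
  obtain ⟨kw, _, rfl⟩ := hr
  rfl

-- a block selects nothing exactly when none of its keywords occurs
theorem pvEmpty (kws : List String) (role ql : String) :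
    ((List.filter (fun r => PySem.Str.isIn r.1 ql) (pvBlock kws role)).map (fun r => r.2) = []) =
    ((kws.any fun kw => PySem.Str.isIn kw ql) = false) := by
  apply propext
  simp [pvBlock, List.filter_eq_nil_iff, List.any_eq_false]

theorem pv_add_add_self (s : List String) (c : String) :
    PySem.Set.add (PySem.Set.add s c) c = PySem.Set.add s c := by
  by_cases h : c ∈ s
  · simp [PySem.Set.add, h]
  · simp [PySem.Set.add, h]

theorem pv_foldl_add_const (c : String) (l : List String) (s : List String)
    (hl : ∀ x ∈ l, x = c) :
    List.foldl PySem.Set.add s l = if l = [] then s else PySem.Set.add s c := by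
  induction l generalizing s with
  | nil => simp
  | cons x xs ih =>
    have hx : x = c := hl x (by simp)
    subst hx
    have := ih (PySem.Set.add s x) (fun y hy => hl y (by simp [hy]))
    simp only [List.foldl_cons, this]
    cases xs with
    | nil => simp
    | cons a as =>
      simp only [pv_add_add_self]
      simp

theorem pv_step (c : String) (l rest s : List String) (hl : ∀ x ∈ l, x = c) :
    List.foldl PySem.Set.add s (l ++ rest) =
    List.foldl PySem.Set.add (if l = [] then s else PySem.Set.add s c) rest := by
  rw [List.foldl_append, pv_foldl_add_const c l s hl]

-- a non-final block of the flat scan, folded into the accumulated set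
theorem pv_step' (kws : List String) (role ql : String) (rest s : List String) :
    List.foldl PySem.Set.add s
      ((List.filter (fun r => PySem.Str.isIn r.1 ql) (pvBlock kws role)).map (fun r => r.2) ++ rest) =
    List.foldl PySem.Set.add
      (if (List.filter (fun r => PySem.Str.isIn r.1 ql) (pvBlock kws role)).map (fun r => r.2) = []
       then s else PySem.Set.add s role) rest :=
  pv_step role _ rest s (pvConst kws role ql)

-- the final block of the flat scan
theorem pv_last' (kws : List String) (role ql : String) (s : List String) :
    List.foldl PySem.Set.add s
      ((List.filter (fun r => PySem.Str.isIn r.1 ql) (pvBlock kws role)).map (fun r => r.2)) =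
    (if (List.filter (fun r => PySem.Str.isIn r.1 ql) (pvBlock kws role)).map (fun r => r.2) = []
     then s else PySem.Set.add s role) :=
  pv_foldl_add_const role _ s (pvConst kws role ql)

theorem pv_main (q : String) : select_participants_py q = select_participants_py_alt q := by
  simp only [select_participants_py, select_participants_py_alt]
  rw [PySem.List.foldl_append_if]
  rw [pvRules_eq]
  simp only [List.filter_append, List.map_append, List.nil_append]
  simp only [List.append_eq_nil_iff, pvEmpty]
  cases hc1 : (["architect", "design", "system", "scale"].any fun kw => PySem.Str.isIn kw (PySem.Str.lower q)) <;>
  cases hc2 : (["implement", "build", "develop", "code"].any fun kw => PySem.Str.isIn kw (PySem.Str.lower q)) <;>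
  cases hc3 : (["security", "safe", "risk", "protect"].any fun kw => PySem.Str.isIn kw (PySem.Str.lower q)) <;>
  cases hc4 : (["quality", "test", "reliable", "bug"].any fun kw => PySem.Str.isIn kw (PySem.Str.lower q)) <;>
  cases hc5 : (["research", "compare", "evaluate", "option"].any fun kw => PySem.Str.isIn kw (PySem.Str.lower q)) <;>
  simp only [PySem.Set.ofList_eq_foldl, pv_step', pv_last', pvEmpty, hc1, hc2, hc3, hc4, hc5,
    List.nil_append, Bool.true_eq_false, Bool.false_eq_true,
    and_true, and_false, and_self, reduceIte] <;> decide

-- ===== VERDICT (by name: the statement is the Claim_ definition above) =====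
theorem select_participants_py_spec : Claim_equal_select_participants_py := by
  intro question _
  exact pv_main question
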